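-- pv_equiv track=rewrite | github.com/jacklxc/CORWA | pipeline/data_util.py | patch_sent_tokenize
-- ===== SOURCE A (Python) =====
-- def patch_sent_tokenize(sentences):
--     out = []
--     i = 0
--     while i < len(sentences):
--         if i>0 and sentences[i-1][-4:] == " et." and sentences[i][:2] == "al":
--             out[-1] += " " + sentences[i]
--         elif i>0 and (sentences[i-1][-4:] == " al." or sentences[i-1]=="al."):
--             out[-1] += " " + sentences[i]
--         elif i>0 and sentences[i-1][-4:] == "e.g.":
--             out[-1] += " " + sentences[i]
--         elif i>0 and sentences[i-1][-4:] == "i.e.":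
--             out[-1] += " " + sentences[i]
--         else:
--             out.append(sentences[i])
--         i += 1
--     return out
-- ===== SOURCE B (Python) =====
-- def patch_sent_tokenize(sentences):
--     def glue(prev, cur):
--         return ((prev[-4:] == " et." and cur[:2] == "al")
--                 or prev[-4:] == " al." or prev == "al."
--                 or prev[-4:] == "e.g." or prev[-4:] == "i.e.")
--     n = len(sentences)
--     # cut points: indices where a new output sentence begins
--     starts = [i for i in range(n)
--               if i == 0 or not glue(sentences[i - 1], sentences[i])]
--     # slice the original list at the cut points and join each segment once
--     return [" ".join(sentences[b:e]) for b, e in zip(starts, starts[1:] + [n])]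
-- ===== Notes on version B (the rewrite author's own statement) =====
-- stated objective: alternative
-- what changed: Replaces A's sequential while loop that mutates out[-1] by repeated string concatenation with a cut-point algorithm: first compute the list of indices where a new sentence starts, then slice the original list between consecutive cut points and ' '.join each slice once.
import Mathlib
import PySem

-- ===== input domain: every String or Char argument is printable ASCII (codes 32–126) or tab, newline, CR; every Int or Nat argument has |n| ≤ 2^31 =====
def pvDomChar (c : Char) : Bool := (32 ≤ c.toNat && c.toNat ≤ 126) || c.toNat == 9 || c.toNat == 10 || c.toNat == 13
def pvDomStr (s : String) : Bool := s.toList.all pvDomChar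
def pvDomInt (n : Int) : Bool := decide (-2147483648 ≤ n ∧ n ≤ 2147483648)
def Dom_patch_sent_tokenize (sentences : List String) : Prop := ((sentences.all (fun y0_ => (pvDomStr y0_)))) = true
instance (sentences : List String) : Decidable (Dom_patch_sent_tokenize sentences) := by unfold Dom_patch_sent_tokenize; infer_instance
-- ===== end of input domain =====

-- B replaces A's sequential while loop (mutating out[-1] by repeated +=) with a cut-point
-- algorithm: compute the start indices of output sentences, then slice the original list
-- between consecutive cut points and join each slice once; alternative, same cost.


-- ===== PORT A =====
-- out[-1] += x : out is provably nonempty whenever A reaches this line (the first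
-- iteration always takes the append branch), so the getD default "" is never used.
def pyAppendLast (out : List String) (x : String) : List String :=
  out.dropLast ++ [(out.getLast?.getD "") ++ x]

-- A's while loop, step for step; sentences[i-1] is only read when 0 < i (and then
-- i - 1 is in range), so the getD default "" is never used.
def patchLoopA (s : List String) (i : Nat) (out : List String) : List String :=
  if h : i < s.length then
    let out' :=
      if 0 < i ∧ PySem.Str.slice (s.getD (i - 1) "") (some (-4)) none = " et." ∧
          PySem.Str.slice s[i] none (some 2) = "al" then
        pyAppendLast out (" " ++ s[i])
      else if 0 < i ∧ (PySem.Str.slice (s.getD (i - 1) "") (some (-4)) none = " al." ∨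
          s.getD (i - 1) "" = "al.") then
        pyAppendLast out (" " ++ s[i])
      else if 0 < i ∧ PySem.Str.slice (s.getD (i - 1) "") (some (-4)) none = "e.g." then
        pyAppendLast out (" " ++ s[i])
      else if 0 < i ∧ PySem.Str.slice (s.getD (i - 1) "") (some (-4)) none = "i.e." then
        pyAppendLast out (" " ++ s[i])
      else
        out ++ [s[i]]
    patchLoopA s (i + 1) out'
  else out
termination_by s.length - i

def patch_sent_tokenize (sentences : List String) : List String :=
  patchLoopA sentences 0 []

-- ===== PORT B =====
def glue (prev cur : String) : Bool :=
  (PySem.Str.slice prev (some (-4)) none == " et." && PySem.Str.slice cur none (some 2) == "al")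
  || PySem.Str.slice prev (some (-4)) none == " al." || prev == "al."
  || PySem.Str.slice prev (some (-4)) none == "e.g."
  || PySem.Str.slice prev (some (-4)) none == "i.e."

-- the cut-point algorithm of Source B: start indices, then slice-and-join.
-- indices i produced by range(n) are in range, so the getD default "" of pyGet? is never
-- used where the || has not already decided the value (for i = 0 Python short-circuits).
-- the local list 'starts' of Source B, as a top-level helper
def cutStarts (sentences : List String) : List Int :=
  (PySem.List.pyRange 0 sentences.length 1).filter (fun i =>
    i == 0 || !glue ((PySem.List.pyGet? sentences (i - 1)).getD "")
                    ((PySem.List.pyGet? sentences i).getD ""))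

def patch_sent_tokenize_alt (sentences : List String) : List String :=
  (List.zip (cutStarts sentences)
      (PySem.List.slice (cutStarts sentences) (some 1) none ++ [(sentences.length : Int)])).map
    (fun be => PySem.Str.join " " (PySem.List.slice sentences (some be.1) (some be.2)))

-- ===== PRECONDITION & SPEC =====
def Spec_patch_sent_tokenize (sentences : List String) (out : List String) : Prop := out = patch_sent_tokenize_alt sentences
instance (sentences : List String) (out : List String) : Decidable (Spec_patch_sent_tokenize sentences out) := by unfold Spec_patch_sent_tokenize; infer_instance

-- ===== CLAIM (what is proved, stated in full; the proofs are below) =====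
def Claim_equal_patch_sent_tokenize : Prop := ∀ (sentences : List String), Dom_patch_sent_tokenize sentences → Spec_patch_sent_tokenize sentences (patch_sent_tokenize sentences)

-- ===== LEMMAS AND PROOFS =====

-- common reference recursion: accumulated string, previous ORIGINAL sentence, remaining sentences
def go (acc prev : String) : List String → List String
  | [] => [acc]
  | c :: r => if glue prev c then go (acc ++ " " ++ c) c r else acc :: go c c r

-- A's four-branch if-chain (with 0 < i known) collapses to a single test of B's glue
lemma stepA_eq {i : Nat} (hi : 0 < i) (prev cur : String) (x y : List String) :
    (if 0 < i ∧ PySem.Str.slice prev (some (-4)) none = " et." ∧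
        PySem.Str.slice cur none (some 2) = "al" then x
      else if 0 < i ∧ (PySem.Str.slice prev (some (-4)) none = " al." ∨ prev = "al.") then x
      else if 0 < i ∧ PySem.Str.slice prev (some (-4)) none = "e.g." then x
      else if 0 < i ∧ PySem.Str.slice prev (some (-4)) none = "i.e." then x
      else y) =
    (if glue prev cur = true then x else y) := by
  by_cases h1 : PySem.Str.slice prev (some (-4)) none = " et." ∧
      PySem.Str.slice cur none (some 2) = "al"
  · rw [if_pos ⟨hi, h1⟩, if_pos (by simp [glue, h1.1, h1.2])]
  · rw [if_neg (fun h => h1 h.2)]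
    by_cases h2 : PySem.Str.slice prev (some (-4)) none = " al." ∨ prev = "al."
    · rw [if_pos ⟨hi, h2⟩, if_pos (by rcases h2 with h | h <;> simp [glue, h])]
    · rw [if_neg (fun h => h2 h.2)]
      by_cases h3 : PySem.Str.slice prev (some (-4)) none = "e.g."
      · rw [if_pos ⟨hi, h3⟩, if_pos (by simp [glue, h3])]
      · rw [if_neg (fun h => h3 h.2)]
        by_cases h4 : PySem.Str.slice prev (some (-4)) none = "i.e."
        · rw [if_pos ⟨hi, h4⟩, if_pos (by simp [glue, h4])]
        · rw [if_neg (fun h => h4 h.2)]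
          rw [if_neg ?_]
          simp only [glue, Bool.or_eq_true, Bool.and_eq_true, beq_iff_eq]
          rintro ((((⟨hA, hB⟩ | hC) | hD) | hE) | hF)
          · exact h1 ⟨hA, hB⟩
          · exact h2 (Or.inl hC)
          · exact h2 (Or.inr hD)
          · exact h3 hE
          · exact h4 hF

lemma loopA_go (rest : List String) : ∀ (s : List String) (i : Nat) (front : List String)
    (acc prev : String), 0 < i → s.drop (i - 1) = prev :: rest →
    patchLoopA s i (front ++ [acc]) = front ++ go acc prev rest := by
  induction rest with
  | nil =>
    intro s i front acc prev hi hd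
    have hlen : s.length - (i - 1) = 1 := by
      have := congrArg List.length hd; simpa using this
    have hge : ¬ i < s.length := by omega
    rw [patchLoopA, dif_neg hge, go]
  | cons c r ih =>
    intro s i front acc prev hi hd
    have hlen : s.length - (i - 1) = r.length + 2 := by
      have := congrArg List.length hd; simpa using this
    have hlt : i < s.length := by omega
    have hdi : s.drop i = c :: r := by
      have hh : s.drop i = (s.drop (i - 1)).drop 1 := by
        rw [List.drop_drop]; congr 1; omega
      rw [hh, hd]; rfl
    have hcur : s[i] = c := by
      have h0 : (s.drop i).head? = some c := by rw [hdi]; rfl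
      rw [List.head?_drop, List.getElem?_eq_getElem hlt] at h0
      exact Option.some_inj.mp h0
    have hprev : s.getD (i - 1) "" = prev := by
      have h0 : (s.drop (i - 1)).head? = some prev := by rw [hd]; rfl
      rw [List.head?_drop] at h0
      simp [List.getD, h0]
    rw [patchLoopA, dif_pos hlt]
    simp only [hcur, hprev]
    rw [stepA_eq hi prev c (pyAppendLast (front ++ [acc]) (" " ++ c)) ((front ++ [acc]) ++ [c])]
    by_cases hg : glue prev c = true
    · rw [if_pos hg]
      have hAL : pyAppendLast (front ++ [acc]) (" " ++ c) = front ++ [acc ++ (" " ++ c)] := by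
        simp [pyAppendLast]
      rw [hAL, ih s (i + 1) front (acc ++ (" " ++ c)) c (by omega) (by simpa using hdi)]
      rw [go, if_pos hg]
      simp [String.append_assoc]
    · rw [if_neg hg]
      rw [ih s (i + 1) (front ++ [acc]) c c (by omega) (by simpa using hdi)]
      rw [go, if_neg hg]
      simp

lemma A_eq_go (s0 : String) (t : List String) :
    patch_sent_tokenize (s0 :: t) = go s0 s0 t := by
  unfold patch_sent_tokenize
  rw [patchLoopA, dif_pos (by simp : 0 < (s0 :: t).length)]
  rw [if_neg (fun h => Nat.lt_irrefl 0 h.1), if_neg (fun h => Nat.lt_irrefl 0 h.1),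
    if_neg (fun h => Nat.lt_irrefl 0 h.1), if_neg (fun h => Nat.lt_irrefl 0 h.1)]
  simpa using loopA_go t (s0 :: t) 1 [] s0 s0 (by omega) (by rfl)

-- grouping reference recursion (proof-side only): groups of original sentences
def groupsGo (g : List String) (prev : String) : List String → List (List String)
  | [] => [g]
  | c :: r => if glue prev c then groupsGo (g ++ [c]) c r else g :: groupsGo [c] c r

lemma join_concat (c : String) (g : List String) (hg : g ≠ []) :
    PySem.Str.join " " (g ++ [c]) = PySem.Str.join " " g ++ " " ++ c := by
  induction g with
  | nil => exact absurd rfl hg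
  | cons a t iht =>
    cases t with
    | nil =>
      rw [← String.toList_inj]
      simp [PySem.Str.toList_join, PySem.Chars.join_cons_cons, PySem.Chars.join_singleton]
    | cons b u =>
      rw [← String.toList_inj]
      have h1' := congrArg String.toList (iht (by simp))
      simp only [PySem.Str.toList_join, List.map_cons, List.map_append, List.map_nil,
        String.toList_append, List.cons_append] at h1' ⊢
      rw [PySem.Chars.join_cons_cons, PySem.Chars.join_cons_cons, h1']
      simp

lemma join_groupsGo (rest : List String) : ∀ (g : List String) (prev acc : String),
    g ≠ [] → PySem.Str.join " " g = acc →
    (groupsGo g prev rest).map (fun g => PySem.Str.join " " g) = go acc prev rest := by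
  induction rest with
  | nil => intro g prev acc hg hj; simp [groupsGo, go, hj]
  | cons c r ih =>
    intro g prev acc hg hj
    rw [groupsGo, go]
    by_cases hgl : glue prev c = true
    · rw [if_pos hgl, if_pos hgl]
      exact ih (g ++ [c]) c (acc ++ " " ++ c) (by simp) (by rw [join_concat c g hg, hj])
    · rw [if_neg hgl, if_neg hgl]
      rw [List.map_cons, hj]
      rw [ih [c] c c (by simp)
        (by rw [← String.toList_inj]; simp [PySem.Str.toList_join, PySem.Chars.join_singleton])]

-- B-side reference: the cut points after position k, given the previous original sentence
def startsAux (prev : String) (t : List String) (k : Nat) : List Nat :=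
  match t with
  | [] => []
  | c :: r => if glue prev c then startsAux c r (k + 1) else k :: startsAux c r (k + 1)

-- Nat-level form of Source B's start-index filter
def natStarts (s : List String) : List Nat :=
  (List.range s.length).filter (fun k =>
    k == 0 || !glue (s.getD (k - 1) "") (s.getD k ""))

lemma filter_range'_startsAux (t : List String) : ∀ (prev : String) (k : Nat) (s : List String),
    0 < k → s.drop (k - 1) = prev :: t →
    (List.range' k t.length).filter (fun j =>
        j == 0 || !glue (s.getD (j - 1) "") (s.getD j "")) = startsAux prev t k := by
  induction t with
  | nil => intro prev k s hk hd; simp [startsAux]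
  | cons c r ih =>
    intro prev k s hk hd
    have hlen : s.length - (k - 1) = r.length + 2 := by
      have := congrArg List.length hd; simpa using this
    have hlt : k < s.length := by omega
    have hdi : s.drop k = c :: r := by
      have hh : s.drop k = (s.drop (k - 1)).drop 1 := by
        rw [List.drop_drop]; congr 1; omega
      rw [hh, hd]; rfl
    have hcur : s.getD k "" = c := by
      have h0 : (s.drop k).head? = some c := by rw [hdi]; rfl
      rw [List.head?_drop] at h0
      simp [List.getD, h0]
    have hprev : s.getD (k - 1) "" = prev := by
      have h0 : (s.drop (k - 1)).head? = some prev := by rw [hd]; rfl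
      rw [List.head?_drop] at h0
      simp [List.getD, h0]
    have hk0 : (k == 0) = false := by simp; omega
    simp only [List.length_cons]
    rw [List.range'_succ, List.filter_cons]
    simp only [hk0, hprev, hcur, Bool.false_or]
    rw [startsAux]
    by_cases hg : glue prev c = true
    · simp only [hg, Bool.not_true, if_neg (by simp : ¬ (false = true))]
      exact ih c (k + 1) s (by omega) (by simpa using hdi)
    · have hg' : glue prev c = false := by revert hg; cases glue prev c <;> simp
      simp only [hg', Bool.not_false]
      rw [ih c (k + 1) s (by omega) (by simpa using hdi)]
      simp

lemma natStarts_cons (s0 : String) (t : List String) :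
    natStarts (s0 :: t) = 0 :: startsAux s0 t 1 := by
  unfold natStarts
  rw [List.range_eq_range']
  simp only [List.length_cons]
  rw [List.range'_succ, List.filter_cons]
  simp only [(by simp : ((0 : Nat) == 0) = true), Bool.true_or]
  rw [filter_range'_startsAux t s0 1 (s0 :: t) (by omega) (by rfl)]
  simp

-- segments between consecutive cut points are exactly groupsGo's groups
lemma zip_seg_groupsGo (t : List String) : ∀ (prev : String) (k b : Nat) (s : List String),
    b ≤ k → 0 < k → s.drop (k - 1) = prev :: t →
    (List.zip (b :: startsAux prev t k) (startsAux prev t k ++ [s.length])).map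
      (fun be => (s.drop be.1).take (be.2 - be.1)) =
    groupsGo ((s.drop b).take (k - b)) prev t := by
  induction t with
  | nil =>
    intro prev k b s hb hk hd
    have hlen : s.length - (k - 1) = 1 := by
      have := congrArg List.length hd; simpa using this
    have hkn : k = s.length := by omega
    simp [startsAux, groupsGo, hkn, List.take_of_length_le]
  | cons c r ih =>
    intro prev k b s hb hk hd
    have hlen : s.length - (k - 1) = r.length + 2 := by
      have := congrArg List.length hd; simpa using this
    have hlt : k < s.length := by omega
    have hdi : s.drop k = c :: r := by
      have hh : s.drop k = (s.drop (k - 1)).drop 1 := by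
        rw [List.drop_drop]; congr 1; omega
      rw [hh, hd]; rfl
    have hcur : s[k] = c := by
      have h0 : (s.drop k).head? = some c := by rw [hdi]; rfl
      rw [List.head?_drop, List.getElem?_eq_getElem hlt] at h0
      exact Option.some_inj.mp h0
    rw [startsAux, groupsGo]
    by_cases hg : glue prev c = true
    · rw [if_pos hg, if_pos hg]
      have htake : (s.drop b).take (k + 1 - b) = (s.drop b).take (k - b) ++ [c] := by
        have h1 : k + 1 - b = (k - b) + 1 := by omega
        have h2 : k - b < (s.drop b).length := by simp; omega
        rw [h1, List.take_add_one, List.getElem?_eq_getElem h2]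
        congr 1
        simp [List.getElem_drop, show b + (k - b) = k from by omega, hcur]
      rw [← htake] at *
      exact (by rw [ih c (k + 1) b s (by omega) (by omega) (by simpa using hdi)])
    · rw [if_neg hg, if_neg hg]
      rcases hA : startsAux c r (k + 1) ++ [s.length] with _ | ⟨e, es⟩
      · exact absurd (congrArg List.length hA) (by simp)
      · have hz : List.zip (b :: k :: startsAux c r (k + 1))
            ((k :: startsAux c r (k + 1)) ++ [s.length]) =
            (b, k) :: List.zip (k :: startsAux c r (k + 1)) (startsAux c r (k + 1) ++ [s.length]) := by
          simp
        rw [hz, List.map_cons]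
        congr 1
        have hsingle : (s.drop k).take 1 = [c] := by rw [hdi]; rfl
        have := ih c (k + 1) k s (by omega) (by omega) (by simpa using hdi)
        rw [show k + 1 - k = 1 from by omega, hsingle] at this
        exact this

-- B's start-index filter equals the Nat-level cut points, cast to Int
lemma cutStarts_eq (s : List String) :
    cutStarts s = (natStarts s).map (fun k : Nat => (k : Int)) := by
  unfold cutStarts natStarts
  rw [PySem.List.pyRange_one]
  simp only [sub_zero, Int.toNat_natCast, zero_add]
  rw [List.filter_map]
  refine congrArg _ (List.filter_congr ?_)
  intro k hk
  have hklt : k < s.length := List.mem_range.mp hk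
  simp only [Function.comp_apply]
  by_cases hk0 : k = 0
  · simp [hk0]
  · have h1 : ((k : Int) == 0) = false := by simp; omega
    have h2 : (k == 0) = false := by simp [hk0]
    have hsub : (k : Int) - 1 = ((k - 1 : Nat) : Int) := by omega
    rw [h1, h2, hsub, PySem.List.pyGet?_natCast, PySem.List.pyGet?_natCast]
    simp only [Bool.false_or]
    congr 2

-- B's port reduces to the Nat-level zip-of-segments form
lemma B_reduce (s : List String) :
    patch_sent_tokenize_alt s =
    (List.zip (natStarts s) ((natStarts s).tail ++ [s.length])).map
      (fun be => PySem.Str.join " " ((s.drop be.1).take (be.2 - be.1))) := by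
  unfold patch_sent_tokenize_alt
  rw [cutStarts_eq, PySem.List.slice_from_one, ← List.map_tail]
  rw [show ((natStarts s).tail.map (fun k : Nat => (k : Int)) ++ [(s.length : Int)]) =
      ((natStarts s).tail ++ [s.length]).map (fun k : Nat => (k : Int)) from by simp,
    List.zip_map, List.map_map]
  apply List.map_congr_left
  intro be _
  simp only [Function.comp_apply, Prod.map]
  rw [PySem.List.slice_natCast]

lemma B_eq_go (s0 : String) (t : List String) :
    patch_sent_tokenize_alt (s0 :: t) = go s0 s0 t := by
  rw [B_reduce, natStarts_cons]
  have hseg := zip_seg_groupsGo t s0 1 0 (s0 :: t) (by omega) (by omega) (by rfl)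
  simp only [List.tail_cons]
  have hmap : (List.zip (0 :: startsAux s0 t 1) (startsAux s0 t 1 ++ [(s0 :: t).length])).map
      (fun be => PySem.Str.join " " (((s0 :: t).drop be.1).take (be.2 - be.1))) =
      ((List.zip (0 :: startsAux s0 t 1) (startsAux s0 t 1 ++ [(s0 :: t).length])).map
        (fun be => (((s0 :: t).drop be.1).take (be.2 - be.1)))).map
        (fun g => PySem.Str.join " " g) := by
    rw [List.map_map]; rfl
  rw [hmap, hseg]
  have hg1 : ((s0 :: t).drop 0).take (1 - 0) = [s0] := rfl
  rw [hg1]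
  exact join_groupsGo t [s0] s0 s0 (by simp)
    (by rw [← String.toList_inj]; simp [PySem.Str.toList_join, PySem.Chars.join_singleton])

-- ===== VERDICT (by name: the statement is the Claim_ definition above) =====
theorem patch_sent_tokenize_spec : Claim_equal_patch_sent_tokenize := by
  intro sentences _
  unfold Spec_patch_sent_tokenize
  cases sentences with
  | nil =>
    unfold patch_sent_tokenize patch_sent_tokenize_alt
    rw [patchLoopA]
    simp [cutStarts]
  | cons s0 t => rw [A_eq_go, B_eq_go]
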